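-- pv_equiv track=rewrite | github.com/blank54/spec | analysis.py | parse
-- ===== SOURCE A (Python) =====
-- def parse(sent, bigram_counter, min_count=20):
--     bigram_list = [bigram for bigram, cnt in bigram_counter.items() if cnt >= min_count]
--
--     sent_with_ngram = []
--     switch = False
--     ngram = [sent[0]]
--
--     for i in range(1, len(sent)):
--         bigram = '{}-{}'.format(sent[i-1], sent[i])
--
--         if bigram in bigram_list:
--             ngram.append(sent[i])
--             switch = True
--         else:
--             sent_with_ngram.append('-'.join(ngram))
--             ngram = [sent[i]]
--             switch = False
--
--         if i == len(sent)-1 and switch == True: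
--             sent_with_ngram.append('-'.join(ngram))
--         else:
--             continue
--
--     return sent_with_ngram
-- ===== SOURCE B (Python) =====
-- def parse(sent, bigram_counter, min_count=20):
--     n = len(sent)
--     frequent = {bigram for bigram, cnt in bigram_counter.items() if cnt >= min_count}
--     # positions where the chain of frequent bigrams breaks
--     cuts = [i for i in range(1, n)
--             if '{}-{}'.format(sent[i - 1], sent[i]) not in frequent]
--     pairs = list(zip([0] + cuts, cuts + [n]))
--     segs = ['-'.join(sent[s:e]) for s, e in pairs]
--     # a final segment of a single token is not an n-gram: it is not emitted
--     if pairs[-1][1] - pairs[-1][0] == 1: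
--         segs.pop()
--     return segs
-- ===== Notes on version B (the rewrite author's own statement) =====
-- stated objective: alternative
-- what changed: A threads a switch/ngram accumulator through one indexed loop, joining and emitting n-grams in-flight; B computes the cut positions (non-frequent bigrams) with a set of frequent bigrams, slices the sentence between consecutive cut bounds, joins each slice, and does not emit a final single-token segment. Pre_ excludes only the empty sentence, on which A raises IndexError at sent[0].
import Mathlib
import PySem

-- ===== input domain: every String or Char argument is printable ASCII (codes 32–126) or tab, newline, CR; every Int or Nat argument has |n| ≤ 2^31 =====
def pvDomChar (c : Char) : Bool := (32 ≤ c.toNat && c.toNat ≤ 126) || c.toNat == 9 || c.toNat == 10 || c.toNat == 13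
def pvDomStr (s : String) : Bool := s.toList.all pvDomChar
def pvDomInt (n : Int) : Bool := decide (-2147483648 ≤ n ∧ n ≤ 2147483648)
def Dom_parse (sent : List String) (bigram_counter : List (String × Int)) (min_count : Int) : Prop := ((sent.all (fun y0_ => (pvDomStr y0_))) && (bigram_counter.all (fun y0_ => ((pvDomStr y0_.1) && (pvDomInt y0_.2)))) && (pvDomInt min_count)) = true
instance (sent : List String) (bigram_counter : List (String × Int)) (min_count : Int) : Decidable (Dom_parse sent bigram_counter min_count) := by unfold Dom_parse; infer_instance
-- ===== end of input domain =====

-- B replaces A's stateful switch/ngram accumulator loop by a cut-position decomposition: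
-- it records the positions where the chain of frequent bigrams breaks, slices the sentence
-- between consecutive bounds and joins each slice, not emitting a final single-token
-- segment (alternative decomposition, same cost).
-- ===== PORT A =====
def parse (sent : List String) (bigram_counter : List (String × Int)) (min_count : Int) : List String :=
  let bigram_list := (bigram_counter.filter (fun p => min_count ≤ p.2)).map Prod.fst
  let n : Int := (sent.length : Int)
  let res := (PySem.List.pyRange 1 n 1).foldl
    (fun (st : List String × Bool × List String) i =>
      let bigram := PySem.List.pyGetD sent (i - 1) "" ++ "-" ++ PySem.List.pyGetD sent i ""
      let st :=
        if bigram ∈ bigram_list then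
          (st.1, true, st.2.2 ++ [PySem.List.pyGetD sent i ""])
        else
          (st.1 ++ [PySem.Str.join "-" st.2.2], false, [PySem.List.pyGetD sent i ""])
      if i = n - 1 ∧ st.2.1 = true then
        (st.1 ++ [PySem.Str.join "-" st.2.2], st.2.1, st.2.2)
      else st)
    (([] : List String), false, [PySem.List.pyGetD sent 0 ""])
  res.1

-- ===== PORT B =====
def parse_alt (sent : List String) (bigram_counter : List (String × Int)) (min_count : Int) : List String :=
  let n : Int := (sent.length : Int)
  let frequent : PySem.Set String :=
    PySem.Set.ofList ((bigram_counter.filter (fun p => min_count ≤ p.2)).map Prod.fst)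
  let cuts := (PySem.List.pyRange 1 n 1).filter
    (fun i => !(PySem.Set.contains frequent
        (PySem.List.pyGetD sent (i - 1) "" ++ "-" ++ PySem.List.pyGetD sent i "")))
  let pairs := (0 :: cuts).zip (cuts ++ [n])
  let segs := pairs.map
    (fun p => PySem.Str.join "-" (PySem.List.slice sent (some p.1) (some p.2)))
  -- pairs[-1]: pairs is always nonempty (zip of two nonempty lists), so getLastD is exact
  if (pairs.getLastD (0, 0)).2 - (pairs.getLastD (0, 0)).1 = 1 then segs.dropLast else segs

-- ===== PRECONDITION & SPEC =====
-- Pre_parse excludes only the empty sentence, on which A raises IndexError at sent[0].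
def Pre_parse (sent : List String) (bigram_counter : List (String × Int)) (min_count : Int) : Prop := sent ≠ []
instance (sent : List String) (bigram_counter : List (String × Int)) (min_count : Int) : Decidable (Pre_parse sent bigram_counter min_count) := by unfold Pre_parse; infer_instance
def pvWitness_parse : List String × (List (String × Int)) × Int := (["a", "b", "c"], [("a-b", 25), ("b-c", 3)], 20)
def Spec_parse (sent : List String) (bigram_counter : List (String × Int)) (min_count : Int) (out : List String) : Prop := out = parse_alt sent bigram_counter min_count
instance (sent : List String) (bigram_counter : List (String × Int)) (min_count : Int) (out : List String) : Decidable (Spec_parse sent bigram_counter min_count out) := by unfold Spec_parse; infer_instance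

-- ===== CLAIM (what is proved, stated in full; the proofs are below) =====
def Claim_equal_parse : Prop := ∀ (sent : List String) (bigram_counter : List (String × Int)) (min_count : Int), Dom_parse sent bigram_counter min_count → Pre_parse sent bigram_counter min_count → Spec_parse sent bigram_counter min_count (parse sent bigram_counter min_count)

-- ===== LEMMAS AND PROOFS =====

-- join with "-", fixed once
def jn : List String → String := PySem.Str.join "-"

-- the maximal runs of tokens linked by P-frequent bigrams, starting from token x
def runsAux (P : String → String → Bool) : String → List String → List (List String)
  | x, [] => [[x]]
  | x, y :: ys =>
    let r := runsAux P y ys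
    if P x y then (x :: r.headI) :: r.tail else [x] :: r

-- model of A's loop on the remaining tokens (prev = previous token, ngram = current run, acc = output)
def loopA (P : String → String → Bool) : String → List String → List String → List String → List String
  | _, _, acc, [] => acc
  | prev, ngram, acc, [y] =>
    if P prev y then acc ++ [jn (ngram ++ [y])] else acc ++ [jn ngram]
  | prev, ngram, acc, y :: y2 :: ys =>
    if P prev y then loopA P y (ngram ++ [y]) acc (y2 :: ys)
    else loopA P y [y] (acc ++ [jn ngram]) (y2 :: ys)

-- model of B's cut-position list (positions k, k+1, … for the suffix)
def cutsL (P : String → String → Bool) : String → List String → Nat → List Int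
  | _, [], _ => []
  | prev, y :: ys, k => (if P prev y then [] else [(k : Int)]) ++ cutsL P y ys (k + 1)

-- whether the LAST bigram of the suffix is frequent
def tailP (P : String → String → Bool) : String → List String → Bool
  | _, [] => true
  | prev, [y] => P prev y
  | _, y :: y2 :: ys => tailP P y (y2 :: ys)

-- join all runs, dropping the last one when it is a single token
def sealJ (rs : List (List String)) : List String :=
  if (rs.getLastD []).length = 1 then (rs.map jn).dropLast else rs.map jn

theorem runsAux_ne_nil (P : String → String → Bool) (x : String) (xs : List String) :
    runsAux P x xs ≠ [] := by
  cases xs with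
  | nil => simp [runsAux]
  | cons y ys =>
    simp only [runsAux]
    split <;> simp


theorem getLast?_cons_ne_nil {α : Type} (a : α) (l : List α) (h : l ≠ []) :
    (a :: l).getLast? = l.getLast? := by
  cases l with
  | nil => simp at h
  | cons b t => simp [List.getLast?_cons_cons]

theorem runsAux_cons_pos (P : String → String → Bool) (x y : String) (ys : List String)
    (h : P x y = true) :
    runsAux P x (y :: ys) = (x :: (runsAux P y ys).headI) :: (runsAux P y ys).tail := by
  simp [runsAux, h]

theorem runsAux_cons_neg (P : String → String → Bool) (x y : String) (ys : List String)
    (h : P x y = false) :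
    runsAux P x (y :: ys) = [x] :: runsAux P y ys := by
  simp [runsAux, h]

theorem headI_tail_of_ne_nil {α : Type} [Inhabited α] (l : List α) (h : l ≠ []) :
    l.headI :: l.tail = l := by
  cases l with
  | nil => simp at h
  | cons a t => simp

theorem seal_cons_of_ne_nil (a : List String) (r : List (List String)) (hr : r ≠ []) :
    sealJ (a :: r) = jn a :: sealJ r := by
  unfold sealJ
  rw [List.getLastD_eq_getLast?, List.getLastD_eq_getLast?, getLast?_cons_ne_nil _ _ hr]
  split
  · simp only [List.map_cons]
    rw [List.dropLast_cons_of_ne_nil (by simpa using hr)]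
  · simp

theorem loopA_cons₂ (P : String → String → Bool) (prev : String) (ngram acc : List String)
    (y y2 : String) (ys : List String) :
    loopA P prev ngram acc (y :: y2 :: ys) =
      if P prev y then loopA P y (ngram ++ [y]) acc (y2 :: ys)
      else loopA P y [y] (acc ++ [jn ngram]) (y2 :: ys) := rfl

theorem loopA_eq_seal (P : String → String → Bool) :
    ∀ (ys : List String) (y : String) (pre : List String) (prev : String) (acc : List String),
    loopA P prev (pre ++ [prev]) acc (y :: ys) =
      acc ++ sealJ ((pre ++ (runsAux P prev (y :: ys)).headI) :: (runsAux P prev (y :: ys)).tail) := by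
  intro ys
  induction ys with
  | nil =>
    intro y pre prev acc
    cases h : P prev y with
    | true =>
      rw [runsAux_cons_pos P prev y [] h]
      simp [loopA, runsAux, h, sealJ, List.append_assoc]
    | false =>
      rw [runsAux_cons_neg P prev y [] h]
      simp [loopA, runsAux, h, sealJ]
  | cons z zs ih =>
    intro y pre prev acc
    have hr := runsAux_ne_nil P y (z :: zs)
    cases h : P prev y with
    | true =>
      rw [runsAux_cons_pos P prev y (z :: zs) h]
      have hl : loopA P prev (pre ++ [prev]) acc (y :: z :: zs) =
          loopA P y ((pre ++ [prev]) ++ [y]) acc (z :: zs) := by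
        simp [loopA, h, List.append_assoc]
      rw [hl, ih z (pre ++ [prev]) y acc]
      simp [List.append_assoc]
    | false =>
      rw [runsAux_cons_neg P prev y (z :: zs) h]
      have hl : loopA P prev (pre ++ [prev]) acc (y :: z :: zs) =
          loopA P y ([] ++ [y]) (acc ++ [jn (pre ++ [prev])]) (z :: zs) := by
        simp [loopA, h]
      rw [hl, ih z [] y (acc ++ [jn (pre ++ [prev])])]
      rw [List.nil_append, headI_tail_of_ne_nil _ hr]
      show acc ++ [jn (pre ++ [prev])] ++ sealJ (runsAux P y (z :: zs)) =
        acc ++ sealJ ((pre ++ ([prev] :: runsAux P y (z :: zs)).headI) :: ([prev] :: runsAux P y (z :: zs)).tail)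
      simp only [List.headI, List.tail]
      rw [seal_cons_of_ne_nil _ _ hr]
      simp


theorem runsAux_headI_ne_nil (P : String → String → Bool) (x : String) (xs : List String) :
    (runsAux P x xs).headI ≠ [] := by
  cases xs with
  | nil => simp [runsAux]
  | cons y ys =>
    cases h : P x y with
    | true => rw [runsAux_cons_pos P x y ys h]; simp
    | false => rw [runsAux_cons_neg P x y ys h]; simp

theorem cutsL_cons_pos (P : String → String → Bool) (prev y : String) (ys : List String) (k : Nat)
    (h : P prev y = true) : cutsL P prev (y :: ys) k = cutsL P y ys (k + 1) := by
  simp [cutsL, h]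

theorem cutsL_cons_neg (P : String → String → Bool) (prev y : String) (ys : List String) (k : Nat)
    (h : P prev y = false) : cutsL P prev (y :: ys) k = (k : Int) :: cutsL P y ys (k + 1) := by
  simp [cutsL, h]

-- the last run is a single token iff the last bigram is not frequent
theorem runs_last_singleton (P : String → String → Bool) :
    ∀ (ys : List String) (y prev : String),
    (((runsAux P prev (y :: ys)).getLastD []).length = 1) ↔ (tailP P prev (y :: ys) = false) := by
  intro ys
  induction ys with
  | nil =>
    intro y prev
    cases h : P prev y with
    | true =>
      rw [runsAux_cons_pos P prev y [] h]
      simp [runsAux, tailP, h]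
    | false =>
      rw [runsAux_cons_neg P prev y [] h]
      simp [runsAux, tailP, h]
  | cons z zs ih =>
    intro y prev
    have hr := runsAux_ne_nil P y (z :: zs)
    have htl : tailP P prev (y :: z :: zs) = tailP P y (z :: zs) := by simp [tailP]
    rw [htl]
    cases h : P prev y with
    | false =>
      rw [runsAux_cons_neg P prev y (z :: zs) h]
      rw [List.getLastD_eq_getLast?, getLast?_cons_ne_nil _ _ hr,
        ← List.getLastD_eq_getLast?]
      exact ih z y
    | true =>
      rw [runsAux_cons_pos P prev y (z :: zs) h]
      cases ht : (runsAux P y (z :: zs)).tail with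
      | cons r2 rt =>
        have hx : (runsAux P y (z :: zs)).getLast? = (r2 :: rt).getLast? := by
          conv_lhs => rw [← headI_tail_of_ne_nil _ hr, ht]
          exact getLast?_cons_ne_nil _ _ (by simp)
        have h2 := ih z y
        rw [List.getLastD_eq_getLast?, hx] at h2
        rw [List.getLastD_eq_getLast?, getLast?_cons_ne_nil _ _ (List.cons_ne_nil r2 rt)]
        exact h2
      | nil =>
        -- single run: it starts with y and carries a second token, so neither side holds
        have hyz : P y z = true := by
          cases hyz' : P y z with
          | true => rfl
          | false =>
            rw [runsAux_cons_neg P y z zs hyz'] at ht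
            simp only [List.tail_cons] at ht
            exact absurd ht (runsAux_ne_nil P z zs)
        have hh : (runsAux P y (z :: zs)).headI = y :: (runsAux P z zs).headI := by
          rw [runsAux_cons_pos P y z zs hyz]
          rfl
        have hlhs : ([prev :: (runsAux P y (z :: zs)).headI].getLastD [])
            = prev :: (runsAux P y (z :: zs)).headI := by
          simp [List.getLastD]
        rw [hlhs, hh]
        constructor
        · intro habs
          simp at habs
        · intro habs
          exfalso
          have h2 := (ih z y).mpr habs
          have hx : (runsAux P y (z :: zs)).getLastD [] = y :: (runsAux P z zs).headI := by
            conv_lhs => rw [← headI_tail_of_ne_nil _ hr, ht]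
            rw [hh]
            simp [List.getLastD]
          rw [hx] at h2
          have hne := runsAux_headI_ne_nil P z zs
          simp at h2
          exact hne h2

-- the cut list ends at the last position iff the last bigram is not frequent
theorem cuts_last (P : String → String → Bool) :
    ∀ (ys : List String) (y prev : String) (k : Nat),
    ((cutsL P prev (y :: ys) k).getLast? = some ((k + ys.length : Nat) : Int)) ↔
      (tailP P prev (y :: ys) = false) := by
  intro ys
  induction ys with
  | nil =>
    intro y prev k
    cases h : P prev y with
    | true => simp [cutsL, h, tailP]
    | false => simp [cutsL, h, tailP]
  | cons z zs ih =>
    intro y prev k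
    have htl : tailP P prev (y :: z :: zs) = tailP P y (z :: zs) := by simp [tailP]
    have hval : ((k + (z :: zs).length : Nat) : Int) = (((k + 1) + zs.length : Nat) : Int) := by
      simp; omega
    rw [htl]
    cases h : P prev y with
    | true =>
      rw [cutsL_cons_pos P prev y (z :: zs) k h, hval]
      exact ih z y (k + 1)
    | false =>
      rw [cutsL_cons_neg P prev y (z :: zs) k h]
      cases hc : cutsL P y (z :: zs) (k + 1) with
      | nil =>
        constructor
        · intro habs
          exfalso
          simp at habs
          omega
        · intro habs
          have h2 := (ih z y (k + 1)).mpr habs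
          rw [hc] at h2
          simp at h2
      | cons c cs =>
        rw [getLast?_cons_ne_nil _ _ (List.cons_ne_nil c cs), hval, ← hc]
        exact ih z y (k + 1)


theorem cutsL_mem (P : String → String → Bool) :
    ∀ (u : List String) (prev : String) (k : Nat) (e : Int),
    e ∈ cutsL P prev u k → ∃ m : Nat, e = (m : Int) ∧ k ≤ m := by
  intro u
  induction u with
  | nil => intro prev k e h; simp [cutsL] at h
  | cons y ys ih =>
    intro prev k e h
    cases hp : P prev y with
    | true =>
      rw [cutsL_cons_pos P prev y ys k hp] at h
      obtain ⟨m, hm, hk⟩ := ih y (k + 1) e h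
      exact ⟨m, hm, by omega⟩
    | false =>
      rw [cutsL_cons_neg P prev y ys k hp] at h
      rcases List.mem_cons.mp h with h1 | h1
      · exact ⟨k, h1, le_refl k⟩
      · obtain ⟨m, hm, hk⟩ := ih y (k + 1) e h1
        exact ⟨m, hm, by omega⟩

theorem slice_cons_split (sent : List String) (j m : Nat) (hj : j < sent.length) (hm : j + 1 ≤ m) :
    PySem.List.slice sent (some (j : Int)) (some (m : Int)) =
      sent.getD j "" :: PySem.List.slice sent (some ((j : Int) + 1)) (some (m : Int)) := by
  have h1 : ((j : Int) + 1) = ((j + 1 : Nat) : Int) := by push_cast; ring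
  rw [h1, PySem.List.slice_natCast, PySem.List.slice_natCast]
  have hd : sent.drop j = sent.getD j "" :: sent.drop (j + 1) := by
    rw [List.getD_eq_getElem sent "" hj]
    exact List.drop_eq_getElem_cons hj
  rw [hd]
  have ht : m - j = (m - (j + 1)) + 1 := by omega
  rw [ht, List.take_succ_cons]

-- the slices between consecutive cut positions are exactly the runs
theorem slices_eq_runs (P : String → String → Bool) (sent : List String) :
    ∀ (u : List String) (j : Nat), u = sent.drop (j + 1) → j < sent.length →
    (((j : Int) :: cutsL P (sent.getD j "") u (j + 1)).zip
        (cutsL P (sent.getD j "") u (j + 1) ++ [(sent.length : Int)])).map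
      (fun p => PySem.List.slice sent (some p.1) (some p.2))
    = runsAux P (sent.getD j "") u := by
  intro u
  induction u with
  | nil =>
    intro j hu hj
    have hlen : sent.length = j + 1 := by
      have := congrArg List.length hu
      simp [List.length_drop] at this
      omega
    simp only [cutsL, List.nil_append, List.zip_cons_cons, List.zip_nil_right, List.map_cons,
      List.map_nil, runsAux]
    rw [hlen, PySem.List.slice_natCast]
    have hd : sent.drop j = [sent.getD j ""] := by
      rw [List.getD_eq_getElem sent "" hj, List.drop_eq_getElem_cons hj, ← hu]
    rw [hd]
    simp
  | cons y u' ih =>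
    intro j hu hj
    have hlen : sent.length = j + 2 + u'.length := by
      have := congrArg List.length hu
      simp [List.length_drop] at this
      omega
    have hj1 : j + 1 < sent.length := by omega
    have hy : sent.getD (j + 1) "" = y := by
      have h1 : (sent.drop (j + 1))[0]? = some y := by rw [← hu]; rfl
      rw [List.getElem?_drop] at h1
      simp [List.getD_eq_getElem?_getD, h1]
    have hu' : u' = sent.drop (j + 2) := by
      have h1 : (sent.drop (j + 1)).drop 1 = sent.drop (j + 1 + 1) := List.drop_drop
      rw [← hu] at h1
      simpa using h1
    have hcast : ((j + 1 : Nat) : Int) = (j : Int) + 1 := by push_cast; ring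
    cases hp : P (sent.getD j "") y with
    | false =>
      rw [cutsL_cons_neg P _ y u' (j + 1) hp, runsAux_cons_neg P _ y u' hp]
      have hih := ih (j + 1) hu' hj1
      rw [hy] at hih
      simp only [List.cons_append, List.zip_cons_cons, List.map_cons] at hih ⊢
      rw [hih]
      congr 1
      rw [PySem.List.slice_natCast]
      have h1 : (j + 1) - j = 1 := by omega
      have hd : sent.drop j = sent.getD j "" :: sent.drop (j + 1) := by
        rw [List.getD_eq_getElem sent "" hj]
        exact List.drop_eq_getElem_cons hj
      rw [h1, hd, List.take_succ_cons, List.take_zero]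
    | true =>
      rw [cutsL_cons_pos P _ y u' (j + 1) hp, runsAux_cons_pos P _ y u' hp]
      have hih := ih (j + 1) hu' hj1
      rw [hy, hcast] at hih
      cases hc : cutsL P y u' (j + 2) with
      | nil =>
        rw [hc] at hih
        simp only [List.nil_append, List.zip_cons_cons, List.zip_nil_right, List.map_cons,
          List.map_nil] at hih ⊢
        rw [← hih]
        simp only [List.headI, List.tail]
        rw [slice_cons_split sent j sent.length hj (by omega)]
      | cons c cs =>
        rw [hc] at hih
        obtain ⟨m, hm, hkm⟩ := cutsL_mem P u' y (j + 2) c (by rw [hc]; exact List.mem_cons_self)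
        simp only [List.cons_append, List.zip_cons_cons, List.map_cons] at hih ⊢
        rw [← hih]
        simp only [List.headI, List.tail]
        rw [hm, slice_cons_split sent j m hj (by omega)]


theorem filter_eq_cutsL (P : String → String → Bool) (sent : List String) :
    ∀ (u : List String) (j : Nat), u = sent.drop (j + 1) → j < sent.length →
    (PySem.List.pyRange ((j : Int) + 1) ((sent.length : Nat) : Int) 1).filter
        (fun i => !(P (PySem.List.pyGetD sent (i - 1) "") (PySem.List.pyGetD sent i "")))
      = cutsL P (sent.getD j "") u (j + 1) := by
  intro u
  induction u with
  | nil =>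
    intro j hu hj
    have hlen : sent.length = j + 1 := by
      have := congrArg List.length hu
      simp [List.length_drop] at this
      omega
    rw [PySem.List.pyRange_one_eq_nil (by omega)]
    rfl
  | cons y u' ih =>
    intro j hu hj
    have hlen : sent.length = j + 2 + u'.length := by
      have := congrArg List.length hu
      simp [List.length_drop] at this
      omega
    have hj1 : j + 1 < sent.length := by omega
    have hy : sent.getD (j + 1) "" = y := by
      have h1 : (sent.drop (j + 1))[0]? = some y := by rw [← hu]; rfl
      rw [List.getElem?_drop] at h1
      simp [List.getD_eq_getElem?_getD, h1]
    have hu' : u' = sent.drop (j + 2) := by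
      have h1 : (sent.drop (j + 1)).drop 1 = sent.drop (j + 1 + 1) := List.drop_drop
      rw [← hu] at h1
      simpa using h1
    have hcast : ((j + 1 : Nat) : Int) = (j : Int) + 1 := by push_cast; ring
    rw [PySem.List.pyRange_one_cons (by omega), List.filter_cons]
    have harg1 : ((j : Int) + 1 - 1) = ((j : Nat) : Int) := by ring
    have hget1 : PySem.List.pyGetD sent ((j : Int) + 1 - 1) "" = sent.getD j "" := by
      rw [harg1, PySem.List.pyGetD_natCast]
    have hget2 : PySem.List.pyGetD sent ((j : Int) + 1) "" = y := by
      rw [← hcast, PySem.List.pyGetD_natCast, hy]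
    have hih := ih (j + 1) hu' hj1
    rw [hy, hcast] at hih
    cases hp : P (sent.getD j "") y with
    | true =>
      rw [cutsL_cons_pos P _ y u' (j + 1) hp]
      simp only [hget1, hget2, hp, Bool.not_true, Bool.false_eq_true, if_false]
      exact hih
    | false =>
      rw [cutsL_cons_neg P _ y u' (j + 1) hp]
      simp only [hget1, hget2, hp, Bool.not_false, if_true]
      rw [hcast, hih]

theorem foldl_eq_loopA (bl : List String) (sent : List String) :
    ∀ (u : List String) (j : Nat) (acc ngram : List String) (sw : Bool),
    u = sent.drop (j + 1) → j < sent.length →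
    ((PySem.List.pyRange ((j : Int) + 1) ((sent.length : Nat) : Int) 1).foldl
      (fun (st : List String × Bool × List String) i =>
        let bigram := PySem.List.pyGetD sent (i - 1) "" ++ "-" ++ PySem.List.pyGetD sent i ""
        let st2 :=
          if bigram ∈ bl then
            (st.1, true, st.2.2 ++ [PySem.List.pyGetD sent i ""])
          else
            (st.1 ++ [PySem.Str.join "-" st.2.2], false, [PySem.List.pyGetD sent i ""])
        if i = ((sent.length : Nat) : Int) - 1 ∧ st2.2.1 = true then
          (st2.1 ++ [PySem.Str.join "-" st2.2.2], st2.2.1, st2.2.2)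
        else st2)
      (acc, sw, ngram)).1
    = loopA (fun a b => decide ((a ++ "-" ++ b) ∈ bl)) (sent.getD j "") ngram acc u := by
  intro u
  induction u with
  | nil =>
    intro j acc ngram sw hu hj
    have hlen : sent.length = j + 1 := by
      have := congrArg List.length hu
      simp [List.length_drop] at this
      omega
    rw [PySem.List.pyRange_one_eq_nil (by omega)]
    rfl
  | cons y u' ih =>
    intro j acc ngram sw hu hj
    have hlen : sent.length = j + 2 + u'.length := by
      have := congrArg List.length hu
      simp [List.length_drop] at this
      omega
    have hj1 : j + 1 < sent.length := by omega
    have hy : sent.getD (j + 1) "" = y := by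
      have h1 : (sent.drop (j + 1))[0]? = some y := by rw [← hu]; rfl
      rw [List.getElem?_drop] at h1
      simp [List.getD_eq_getElem?_getD, h1]
    have hu' : u' = sent.drop (j + 2) := by
      have h1 : (sent.drop (j + 1)).drop 1 = sent.drop (j + 1 + 1) := List.drop_drop
      rw [← hu] at h1
      simpa using h1
    have hcast : ((j + 1 : Nat) : Int) = (j : Int) + 1 := by push_cast; ring
    have harg1 : ((j : Int) + 1 - 1) = ((j : Nat) : Int) := by ring
    have hget1 : PySem.List.pyGetD sent ((j : Int) + 1 - 1) "" = sent.getD j "" := by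
      rw [harg1, PySem.List.pyGetD_natCast]
    have hget2 : PySem.List.pyGetD sent ((j : Int) + 1) "" = y := by
      rw [← hcast, PySem.List.pyGetD_natCast, hy]
    rw [PySem.List.pyRange_one_cons (by omega), List.foldl_cons]
    cases u' with
    | nil =>
      rw [List.length_nil] at hlen
      have hend : ((j : Int) + 1) = ((sent.length : Nat) : Int) - 1 := by
        rw [hlen]; push_cast; omega
      have hnil : PySem.List.pyRange ((j : Int) + 1 + 1) ((sent.length : Nat) : Int) 1 = [] := by
        apply PySem.List.pyRange_one_eq_nil
        rw [hlen]; push_cast; omega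
      by_cases hmem : (sent.getD j "" ++ "-" ++ y) ∈ bl
      · simp only [hget1, hget2]
        rw [if_pos hmem, if_pos ⟨hend, rfl⟩, hnil, List.foldl_nil]
        simp only [loopA, jn, decide_eq_true_eq]
        rw [if_pos hmem]
      · simp only [hget1, hget2]
        rw [if_neg hmem, if_neg (by simp), hnil, List.foldl_nil]
        simp only [loopA, jn, decide_eq_true_eq]
        rw [if_neg hmem]
    | cons y2 us =>
      simp only [List.length_cons] at hlen
      have hend : ¬(((j : Int) + 1) = ((sent.length : Nat) : Int) - 1) := by
        rw [hlen]; push_cast; omega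
      have hih := ih (j + 1)
      rw [hcast] at hih
      by_cases hmem : (sent.getD j "" ++ "-" ++ y) ∈ bl
      · have hstep := hih acc (ngram ++ [y]) true hu' hj1
        rw [hy] at hstep
        simp only [hget1, hget2]
        rw [if_pos hmem, if_neg (by simp [hend]), hstep, loopA_cons₂,
          if_pos (by simpa using hmem)]
      · have hstep := hih (acc ++ [PySem.Str.join "-" ngram]) [y] false hu' hj1
        rw [hy] at hstep
        simp only [hget1, hget2]
        rw [if_neg hmem, if_neg (by simp [hend]), hstep, loopA_cons₂,
          if_neg (by simpa using hmem)]
        rfl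

-- last pair of the bounds zip: (last cut or 0, n)
theorem zip_getLastD (n : Int) :
    ∀ (cuts : List Int) (a : Int) (d : Int × Int),
    ((a :: cuts).zip (cuts ++ [n])).getLastD d = (cuts.getLastD a, n) := by
  intro cuts
  induction cuts with
  | nil => intro a d; simp [List.getLastD]
  | cons c cs ih =>
    intro a d
    simp only [List.cons_append, List.zip_cons_cons, List.getLastD_cons]
    exact ih c (a, c)

-- ===== VERDICT (by name: the statement is the Claim_ definition above) =====
theorem parse_spec : Claim_equal_parse := by
  intro sent bc mc hdom hpre
  show parse sent bc mc = parse_alt sent bc mc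
  cases sent with
  | nil => exact absurd rfl hpre
  | cons x xs =>
    cases xs with
    | nil =>
      show parse [x] bc mc = parse_alt [x] bc mc
      simp [parse, parse_alt, PySem.List.pyRange_one_eq_nil, List.getLastD]
    | cons y ys =>
      have hj0 : 0 < (x :: y :: ys).length := by simp
      have hA := foldl_eq_loopA ((bc.filter (fun p => mc ≤ p.2)).map Prod.fst) (x :: y :: ys)
        (y :: ys) 0 [] [PySem.List.pyGetD (x :: y :: ys) 0 ""] false rfl hj0
      simp only [Nat.cast_zero, zero_add] at hA
      simp only [parse, parse_alt]
      rw [hA]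
      have hx1 : (x :: y :: ys).getD 0 "" = x := rfl
      have hx2 : PySem.List.pyGetD (x :: y :: ys) 0 "" = x := by
        have h0 : ((0 : Nat) : Int) = (0 : Int) := by norm_num
        rw [← h0, PySem.List.pyGetD_natCast]
        rfl
      rw [hx1, hx2]
      -- B side: replace the filtered range by the recursive cut list
      have hB := filter_eq_cutsL
        (fun a b => PySem.Set.contains
          (PySem.Set.ofList ((bc.filter (fun p => mc ≤ p.2)).map Prod.fst)) (a ++ "-" ++ b))
        (x :: y :: ys) (y :: ys) 0 rfl hj0
      simp only [Nat.cast_zero, zero_add] at hB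
      rw [hx1] at hB
      rw [hB]
      have hPP : (fun a b => PySem.Set.contains
            (PySem.Set.ofList ((bc.filter (fun p => mc ≤ p.2)).map Prod.fst)) (a ++ "-" ++ b))
          = (fun a b => decide ((a ++ "-" ++ b) ∈ (bc.filter (fun p => mc ≤ p.2)).map Prod.fst)) := by
        funext a b
        simp [pysem]
      rw [hPP]
      set P : String → String → Bool :=
        fun a b => decide ((a ++ "-" ++ b) ∈ (bc.filter (fun p => mc ≤ p.2)).map Prod.fst) with hPdef
      have hS := slices_eq_runs P (x :: y :: ys) (y :: ys) 0 rfl hj0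
      simp only [Nat.cast_zero, zero_add] at hS
      rw [hx1] at hS
      have hcomp : (fun p : Int × Int =>
            PySem.Str.join "-" (PySem.List.slice (x :: y :: ys) (some p.1) (some p.2)))
          = jn ∘ (fun p : Int × Int => PySem.List.slice (x :: y :: ys) (some p.1) (some p.2)) := rfl
      rw [hcomp, ← List.map_map, hS]
      have hseal := loopA_eq_seal P ys y [] x []
      simp only [List.nil_append] at hseal
      rw [headI_tail_of_ne_nil _ (runsAux_ne_nil P x (y :: ys))] at hseal
      rw [hseal]
      rw [zip_getLastD]
      have hlast := cuts_last P ys y x 1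
      have hsing := runs_last_singleton P ys y x
      have hvv : ((1 + ys.length : Nat) : Int) = (((x :: y :: ys).length : Nat) : Int) - 1 := by
        simp only [List.length_cons]
        push_cast
        omega
      cases hts : tailP P x (y :: ys) with
      | false =>
        have h1 := hsing.mpr hts
        have h2 := hlast.mpr hts
        have hd : (cutsL P x (y :: ys) 1).getLastD 0 = ((1 + ys.length : Nat) : Int) := by
          rw [List.getLastD_eq_getLast?, h2]
          rfl
        rw [sealJ, if_pos h1, if_pos (by rw [hd, hvv]; ring)]
      | true =>
        have h1 : ¬(((runsAux P x (y :: ys)).getLastD []).length = 1) := by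
          rw [hsing, hts]
          simp
        have h2 : ¬((cutsL P x (y :: ys) 1).getLast? = some ((1 + ys.length : Nat) : Int)) := by
          rw [hlast, hts]
          simp
        rw [sealJ, if_neg h1]
        rw [if_neg ?_]
        intro hcond
        cases hgl : (cutsL P x (y :: ys) 1).getLast? with
        | none =>
          have hcnil : cutsL P x (y :: ys) 1 = [] := List.getLast?_eq_none_iff.mp hgl
          rw [hcnil] at hcond
          simp only [List.getLastD, List.length_cons] at hcond
          push_cast at hcond
          omega
        | some v =>
          have hdv : (cutsL P x (y :: ys) 1).getLastD 0 = v := by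
            rw [List.getLastD_eq_getLast?, hgl]
            rfl
          rw [hdv] at hcond
          apply h2
          rw [hgl, hvv]
          congr 1
          omega
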